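-- pv_equiv track=rewrite | github.com/phenopolis/phenopolis_genomics_browser | varnorm/varnorm/varcharkey.py | int2VarChar
-- ===== SOURCE A (Python) =====
-- codeMap = '0123456789@ABCDEFGHIJKLMNOPQRSTUVWXYZ_abcdefghijklmnopqrstuvwxyz'
--
-- def int2VarChar(i, strLength = None):
--     #transform integer to characters based on its bit presentation
--     chars = ''
--     while i > 0:
--         chars += codeMap[(i & 63)]
--         i >>= 6
--     if strLength and strLength > len(chars):
--         chars += '0'*(strLength-len(chars))
--     return chars[::-1]
-- ===== SOURCE B (Python) =====
-- codeMap = '0123456789@ABCDEFGHIJKLMNOPQRSTUVWXYZ_abcdefghijklmnopqrstuvwxyz'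
--
-- def int2VarChar(i, strLength = None):
--     # emit the 6-bit chunks most-significant-first; no trailing reversal needed
--     n = (i.bit_length() + 5) // 6 if i > 0 else 0
--     pad = '0' * (strLength - n) if strLength and strLength > n else ''
--     return pad + ''.join(codeMap[(i >> (6 * pos)) & 63] for pos in range(n - 1, -1, -1))
-- ===== Notes on version B (the rewrite author's own statement) =====
-- stated objective: alternative
-- what changed: B computes the chunk count from i.bit_length() up front and emits the base-64 digits most-significant-first with explicit shifts, prepending the '0' padding, instead of A's LSB-first string accumulation followed by a final reversal.
import Mathlib
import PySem

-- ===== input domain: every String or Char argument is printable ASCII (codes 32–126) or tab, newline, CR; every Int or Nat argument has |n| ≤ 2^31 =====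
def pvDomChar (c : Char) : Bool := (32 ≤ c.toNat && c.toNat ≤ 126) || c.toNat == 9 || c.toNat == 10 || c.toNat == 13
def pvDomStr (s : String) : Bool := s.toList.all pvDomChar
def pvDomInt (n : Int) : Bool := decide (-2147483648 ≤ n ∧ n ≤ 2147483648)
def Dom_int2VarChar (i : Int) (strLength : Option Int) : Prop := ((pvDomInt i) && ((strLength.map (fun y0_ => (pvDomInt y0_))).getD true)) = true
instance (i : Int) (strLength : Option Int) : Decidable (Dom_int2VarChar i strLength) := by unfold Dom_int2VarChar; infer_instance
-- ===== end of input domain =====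

-- B emits the 6-bit chunks most-significant-first from a precomputed chunk count, avoiding A's trailing reversal; objective: alternative decomposition (same asymptotic cost).


-- ===== PORT A =====
def codeMapA : List Char := "0123456789@ABCDEFGHIJKLMNOPQRSTUVWXYZ_abcdefghijklmnopqrstuvwxyz".toList

-- Python's `while i > 0:` loop touches only positive values, so it is looped over i.toNat;
-- on naturals `i & 63` is `&&& 63` and `i >>= 6` is `>>> 6` — exact for every value the loop reaches.
-- The index `m &&& 63` is always < 64, so `getD … '0'` is exactly Python's in-range `codeMap[…]`.
def int2VarCharLoop (m : Nat) (chars : List Char) : List Char :=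
  if m > 0 then int2VarCharLoop (m >>> 6) (chars ++ [codeMapA.getD (m &&& 63) '0'])
  else chars
termination_by m
decreasing_by simpa [Nat.shiftRight_eq_div_pow] using Nat.div_lt_self (by omega) (by norm_num)

def int2VarChar (i : Int) (strLength : Option Int) : String :=
  let chars := int2VarCharLoop i.toNat []
  -- `if strLength and strLength > len(chars):` — truthy means some s with s ≠ 0
  let chars2 := match strLength with
    | none => chars
    | some s => if s ≠ 0 ∧ s > (chars.length : Int)
        then chars ++ List.replicate (s - (chars.length : Int)).toNat '0'
        else chars
  String.mk chars2.reverse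

-- ===== PORT B =====
def codeMapB : List Char := "0123456789@ABCDEFGHIJKLMNOPQRSTUVWXYZ_abcdefghijklmnopqrstuvwxyz".toList

-- `i.bit_length()` for i > 0 is `i.toNat.size`; `range(n-1,-1,-1)` is `(List.range n).reverse`.
def int2VarChar_alt (i : Int) (strLength : Option Int) : String :=
  let n : Nat := if i > 0 then (i.toNat.size + 5) / 6 else 0
  let pad : List Char := match strLength with
    | none => []
    | some s => if s ≠ 0 ∧ s > (n : Int) then List.replicate (s - (n : Int)).toNat '0' else []
  String.mk (pad ++ (List.range n).reverse.map (fun pos => codeMapB.getD ((i.toNat >>> (6 * pos)) &&& 63) '0'))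

-- ===== PRECONDITION & SPEC =====
def Spec_int2VarChar (i : Int) (strLength : Option Int) (out : String) : Prop := out = int2VarChar_alt i strLength
instance (i : Int) (strLength : Option Int) (out : String) : Decidable (Spec_int2VarChar i strLength out) := by unfold Spec_int2VarChar; infer_instance

-- ===== CLAIM (what is proved, stated in full; the proofs are below) =====
def Claim_equal_int2VarChar : Prop := ∀ (i : Int) (strLength : Option Int), Dom_int2VarChar i strLength → Spec_int2VarChar i strLength (int2VarChar i strLength)

-- ===== LEMMAS AND PROOFS =====

-- number of 6-bit chunks of m (B's `n`, as a function of the natural value)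
def lenOf (m : Nat) : Nat := if m = 0 then 0 else (m.size + 5) / 6

lemma size_div64 (m : Nat) (h : 64 ≤ m) : (m / 64).size = m.size - 6 := by
  have h1 : 0 < m / 64 := Nat.div_pos h (by norm_num)
  have hs : 0 < (m / 64).size := Nat.size_pos.mpr h1
  have hub : m / 64 < 2 ^ (m / 64).size := Nat.lt_size_self _
  have hlb : 2 ^ ((m / 64).size - 1) ≤ m / 64 := Nat.lt_size.mp (by omega)
  have hub' : m < 2 ^ ((m / 64).size + 6) := by
    have e1 : m / 64 + 1 ≤ 2 ^ (m / 64).size := hub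
    have e2 : 64 * (m / 64 + 1) ≤ 64 * 2 ^ (m / 64).size := Nat.mul_le_mul_left 64 e1
    have e3 : m < 64 * (m / 64 + 1) := Nat.lt_mul_div_succ m (by norm_num)
    calc m < 64 * (m / 64 + 1) := e3
      _ ≤ 64 * 2 ^ (m / 64).size := e2
      _ = 2 ^ ((m / 64).size + 6) := by rw [pow_add]; ring
  have hlb' : 2 ^ ((m / 64).size + 5) ≤ m := by
    have e1 : 2 ^ ((m / 64).size - 1) * 64 ≤ (m / 64) * 64 := Nat.mul_le_mul_right 64 hlb
    have e2 : (m / 64) * 64 ≤ m := Nat.div_mul_le_self m 64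
    have e3 : 2 ^ ((m / 64).size + 5) ≤ 2 ^ ((m / 64).size - 1) * 64 := by
      have : (m / 64).size + 5 ≤ ((m / 64).size - 1) + 6 := by omega
      calc 2 ^ ((m / 64).size + 5) ≤ 2 ^ (((m / 64).size - 1) + 6) := Nat.pow_le_pow_right (by norm_num) this
        _ = 2 ^ ((m / 64).size - 1) * 64 := by rw [pow_add]; ring
    omega
  have u : m.size ≤ (m / 64).size + 6 := Nat.size_le.mpr hub'
  have l : (m / 64).size + 5 < m.size := Nat.lt_size.mpr hlb'
  omega

lemma lenOf_pos (m : Nat) (h : 0 < m) : lenOf m = lenOf (m >>> 6) + 1 := by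
  have hshift : m >>> 6 = m / 64 := by simp [Nat.shiftRight_eq_div_pow]
  have hs1 : 0 < m.size := Nat.size_pos.mpr h
  rw [hshift]
  rcases lt_or_ge m 64 with hlt | hge
  · have h0 : m / 64 = 0 := Nat.div_eq_of_lt hlt
    have hle : m.size ≤ 6 := Nat.size_le.mpr (by norm_num; omega)
    have e1 : lenOf (m / 64) = 0 := by simp [lenOf, h0]
    have e2 : lenOf m = (m.size + 5) / 6 := by
      unfold lenOf
      rw [if_neg (by omega : ¬ m = 0)]
    rw [e1, e2]
    omega
  · have h1 : 0 < m / 64 := Nat.div_pos hge (by norm_num)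
    have hsz := size_div64 m hge
    have h64 : 7 ≤ m.size := by
      have hle : (2 : Nat) ^ 6 ≤ m := by norm_num; omega
      have := Nat.lt_size.mpr hle
      omega
    simp only [lenOf, if_neg (by omega : ¬ m = 0), if_neg (by omega : ¬ m / 64 = 0)]
    omega

lemma loop_eq (m : Nat) : ∀ acc : List Char, int2VarCharLoop m acc =
    acc ++ (List.range (lenOf m)).map (fun pos => codeMapA.getD ((m >>> (6 * pos)) &&& 63) '0') := by
  induction m using Nat.strong_induction_on with
  | _ m ih =>
    intro acc
    rw [int2VarCharLoop]
    by_cases h : 0 < m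
    · rw [if_pos h]
      have hlt : m >>> 6 < m := by
        simpa [Nat.shiftRight_eq_div_pow] using Nat.div_lt_self h (by norm_num)
      rw [ih _ hlt, lenOf_pos m h, List.range_succ_eq_map, List.map_cons, List.map_map]
      have hf : ∀ pos : Nat, (m >>> 6) >>> (6 * pos) = m >>> (6 * (pos + 1)) := by
        intro pos
        rw [← Nat.shiftRight_add, show 6 + 6 * pos = 6 * (pos + 1) from by ring]
      simp [hf, Function.comp]
    · rw [if_neg h]
      simp [lenOf, show m = 0 from by omega]

-- ===== VERDICT (by name: the statement is the Claim_ definition above) =====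
theorem int2VarChar_spec : Claim_equal_int2VarChar := by
  unfold Claim_equal_int2VarChar Spec_int2VarChar
  intro i strLength _
  have hmap : codeMapB = codeMapA := rfl
  have hn : lenOf i.toNat = (if i > 0 then (i.toNat.size + 5) / 6 else 0) := by
    by_cases h : i > 0
    · rw [if_pos h]
      simp only [lenOf, if_neg (by omega : ¬ i.toNat = 0)]
    · rw [if_neg h]
      simp only [lenOf, if_pos (by omega : i.toNat = 0)]
  simp only [int2VarChar, int2VarChar_alt, loop_eq, List.nil_append, hn, hmap]
  cases strLength with
  | none =>
      simp [List.map_reverse]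
  | some s =>
      simp only [List.length_map, List.length_range]
      split_ifs <;>
        simp [List.reverse_append, List.reverse_replicate, List.map_reverse]
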